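-- pv_equiv track=rewrite | github.com/thioaana/DataStructuresAndAlgorithms | GenomeAssemblyProgrammingChallenge/Week2AssemblingGenomesUsingDeBruijnGraphs/phiX174.py | getCommonSP
-- ===== SOURCE A (Python) =====
-- def getCommonSP(r, stK,stL, exLap) :
--     # Find common substring
--     # From suffix of g and prefix of l
--     m = min(len(stK), len(stL))
--     c1 = m
--     while c1 > 0 :
--         if c1 <= exLap : return 0
--         if stL[:c1] == stK[-c1:] : break
--         c1 -= 1
--     return c1
-- ===== SOURCE B (Python) =====
-- def getCommonSP(r, stK, stL, exLap):
--     # Ascending single pass: keep the largest admissible overlap seen so far.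
--     m = min(len(stK), len(stL))
--     best = 0
--     for c in range(max(exLap, 0) + 1, m + 1):
--         if stL[:c] == stK[len(stK) - c:]:
--             best = c
--     return best
-- ===== Notes on version B (the rewrite author's own statement) =====
-- stated objective: alternative
-- what changed: A's descending while-loop with early return/break is replaced by a single ascending pass over the admissible overlap lengths (exLap+1..m) that keeps the largest matching one in an accumulator; the threshold becomes the range's lower bound instead of an in-loop early return.
import Mathlib
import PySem

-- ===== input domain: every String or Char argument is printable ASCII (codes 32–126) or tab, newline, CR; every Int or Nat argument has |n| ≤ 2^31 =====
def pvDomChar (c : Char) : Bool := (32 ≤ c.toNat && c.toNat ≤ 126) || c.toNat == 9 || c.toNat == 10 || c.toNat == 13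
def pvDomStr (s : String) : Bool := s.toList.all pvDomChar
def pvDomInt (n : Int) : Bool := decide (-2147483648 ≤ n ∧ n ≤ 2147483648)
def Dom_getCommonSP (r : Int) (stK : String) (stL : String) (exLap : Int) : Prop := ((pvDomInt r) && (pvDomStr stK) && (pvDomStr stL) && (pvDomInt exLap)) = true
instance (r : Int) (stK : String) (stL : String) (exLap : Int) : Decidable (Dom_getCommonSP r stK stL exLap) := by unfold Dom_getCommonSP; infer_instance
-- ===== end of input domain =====

-- B replaces A's descending early-exit scan by an ascending single pass keeping the largest
-- admissible overlap (objective: alternative traversal order, same cost).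


-- ===== PORT A =====
-- the while loop: c1 counts down; 'if c1 <= exLap: return 0', then slice comparison, break on match
def pvLoopA (kL lL : List Char) (exLap : Int) : Nat → Int
  | 0 => 0
  | Nat.succ c =>
    if ((c : Int) + 1) ≤ exLap then 0
    else if PySem.List.slice lL none (some ((c : Int) + 1))
            = PySem.List.slice kL (some (-((c : Int) + 1))) none
    then ((c : Int) + 1)
    else pvLoopA kL lL exLap c

def getCommonSP (r : Int) (stK : String) (stL : String) (exLap : Int) : Int :=
  pvLoopA stK.toList stL.toList exLap (min stK.toList.length stL.toList.length)

-- ===== PORT B =====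
def getCommonSP_alt (r : Int) (stK : String) (stL : String) (exLap : Int) : Int :=
  (PySem.List.pyRange (max exLap 0 + 1)
      (min (stK.toList.length : Int) (stL.toList.length : Int) + 1) 1).foldl
    (fun best c =>
      if PySem.List.slice stL.toList none (some c)
          = PySem.List.slice stK.toList (some ((stK.toList.length : Int) - c)) none
      then c else best) 0

-- ===== PRECONDITION & SPEC =====
def Spec_getCommonSP (r : Int) (stK : String) (stL : String) (exLap : Int) (out : Int) : Prop := out = getCommonSP_alt r stK stL exLap
instance (r : Int) (stK : String) (stL : String) (exLap : Int) (out : Int) : Decidable (Spec_getCommonSP r stK stL exLap out) := by unfold Spec_getCommonSP; infer_instance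

-- ===== CLAIM (what is proved, stated in full; the proofs are below) =====
def Claim_equal_getCommonSP : Prop := ∀ (r : Int) (stK : String) (stL : String) (exLap : Int), Dom_getCommonSP r stK stL exLap → Spec_getCommonSP r stK stL exLap (getCommonSP r stK stL exLap)

-- ===== LEMMAS AND PROOFS =====

-- A's descending first match equals B's ascending last match, for every cut-off c1 within both lengths.
lemma pvLoopA_eq_fold (kL lL : List Char) (ex : Int) (c1 : Nat)
    (hk : c1 ≤ kL.length) (hl : c1 ≤ lL.length) :
    pvLoopA kL lL ex c1 =
      (PySem.List.pyRange (max ex 0 + 1) ((c1 : Int) + 1) 1).foldl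
        (fun best c =>
          if PySem.List.slice lL none (some c)
              = PySem.List.slice kL (some ((kL.length : Int) - c)) none
          then c else best) 0 := by
  induction c1 with
  | zero =>
    rw [PySem.List.pyRange_one_eq_nil (by omega)]
    simp [pvLoopA]
  | succ c ih =>
    by_cases hex : ((c : Int) + 1) ≤ ex
    · rw [PySem.List.pyRange_one_eq_nil (by omega)]
      simp [pvLoopA, hex]
    · have ha : max ex 0 + 1 ≤ (c : Int) + 1 := by omega
      have hpeel := PySem.List.pyRange_one_succ_right (a := max ex 0 + 1) (b := (c : Int) + 1) ha
      have : ((c : Nat) + 1 : Int) + 1 = ((c : Int) + 1) + 1 := by push_cast; ring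
      rw [show (((c + 1 : Nat) : Int) + 1) = ((c : Int) + 1) + 1 by push_cast; ring, hpeel,
        List.foldl_append]
      -- the two slice conditions coincide for this last element
      have hA : PySem.List.slice kL (some (-((c : Int) + 1))) none
          = kL.drop (kL.length - (c + 1)) := by
        have := PySem.List.slice_from_neg_natCast kL (c + 1) (by omega)
        simpa using this
      have hB : PySem.List.slice kL (some ((kL.length : Int) - ((c : Int) + 1))) none
          = kL.drop (kL.length - (c + 1)) := by
        rw [PySem.List.slice_from kL (a := (kL.length : Int) - ((c : Int) + 1)) (by omega)]
        congr 1
        omega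
      simp only [List.foldl_cons, List.foldl_nil, pvLoopA, hex, if_false, hA, hB]
      by_cases hm : PySem.List.slice lL none (some ((c : Int) + 1)) = kL.drop (kL.length - (c + 1))
      · simp [hm]
      · simp only [hm, if_false]
        exact ih (by omega) (by omega)

-- ===== VERDICT (by name: the statement is the Claim_ definition above) =====
theorem getCommonSP_spec : Claim_equal_getCommonSP := by
  intro r stK stL exLap _
  unfold Spec_getCommonSP getCommonSP getCommonSP_alt
  rw [pvLoopA_eq_fold stK.toList stL.toList exLap (min stK.toList.length stL.toList.length)
      (Nat.min_le_left _ _) (Nat.min_le_right _ _)]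
  rw [show ((min stK.toList.length stL.toList.length : Nat) : Int)
      = min (stK.toList.length : Int) (stL.toList.length : Int) from by push_cast; rfl]
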